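-- pv_equiv track=rewrite | github.com/TheEnderek0/MaturaInf | 2024/zad_3_1.py | NieparzystySkrot
-- ===== SOURCE A (Python) =====
-- def NieparzystySkrot(x: int):
--     m = 0
--     b = 1
--     while x:
--         a = x % 10 # Cyfra dziesiętna
--         x //= 10 # Zmniejsz o cyfre dziesiętną
--
--         if not a % 2 == 0 and a != 0:
--             m += a * b
--             b *= 10
--
--
--     return m
-- ===== SOURCE B (Python) =====
-- def NieparzystySkrot(x: int):
--     # Stage 1: decompose x into its decimal digits (low to high).
--     digits = []
--     while x:
--         digits.append(x % 10)
--         x //= 10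
--     # Stage 2: rebuild most-significant-first, keeping only odd digits.
--     out = 0
--     for d in reversed(digits):
--         if d % 2:
--             out = out * 10 + d
--     return out
-- ===== Notes on version B (the rewrite author's own statement) =====
-- stated objective: alternative
-- what changed: Replaces A's single while-loop with a running place-value multiplier (m += a*b; b *= 10) by two staged passes: first extract the full digit list, then fold over it in reverse (most-significant-first) with out = out*10 + d for odd digits, eliminating the multiplier state b.
import Mathlib
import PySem

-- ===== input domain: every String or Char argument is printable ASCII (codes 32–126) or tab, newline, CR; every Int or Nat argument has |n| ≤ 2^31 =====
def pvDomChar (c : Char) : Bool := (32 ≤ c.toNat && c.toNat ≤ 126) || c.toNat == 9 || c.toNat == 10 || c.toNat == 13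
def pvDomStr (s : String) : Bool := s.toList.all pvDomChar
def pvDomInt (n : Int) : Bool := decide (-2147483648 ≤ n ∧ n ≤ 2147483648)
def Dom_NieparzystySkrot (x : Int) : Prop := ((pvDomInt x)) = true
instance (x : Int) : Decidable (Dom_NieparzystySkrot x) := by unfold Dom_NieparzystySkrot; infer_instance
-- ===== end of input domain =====

-- B replaces A's single loop with a place-value accumulator by two staged passes
-- (extract the digit list, then fold over it in reverse); return value only, no side
-- effects. Python A never returns for negative x (the while loop does not terminate)
-- and neither does B, so the ports carry the loop variable as x.toNat.

-- ===== PORT A =====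
-- A's while-loop, one call per iteration over the same state (m, b). For x ≥ 0 (the
-- only inputs where the Python loop terminates) x % 10 and x //= 10 coincide with Nat's
-- % and /, so the loop variable is carried as a Nat (also the termination measure).
def NieparzystySkrotGo (x : Nat) (m b : Int) : Int :=
  if h : x = 0 then m
  else
    let a : Int := ((x % 10 : Nat) : Int)
    let x' := x / 10
    if ¬ a % 2 = 0 ∧ a ≠ 0 then NieparzystySkrotGo x' (m + a * b) (b * 10)
    else NieparzystySkrotGo x' m b
termination_by x
decreasing_by all_goals exact Nat.div_lt_self (Nat.pos_of_ne_zero h) (by norm_num)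

def NieparzystySkrot (x : Int) : Int := NieparzystySkrotGo x.toNat 0 1

-- ===== PORT B =====
-- Source B stage 1: the digit list built low-to-high by the first while loop.
def pvDigitList (x : Nat) : List Int :=
  if h : x = 0 then []
  else ((x % 10 : Nat) : Int) :: pvDigitList (x / 10)
termination_by x
decreasing_by exact Nat.div_lt_self (Nat.pos_of_ne_zero h) (by norm_num)

-- Source B stage 2: fold over the reversed digit list, keeping odd digits.
def NieparzystySkrot_alt (x : Int) : Int :=
  (pvDigitList x.toNat).reverse.foldl
    (fun out d => if d % 2 ≠ 0 then out * 10 + d else out) 0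

-- ===== PRECONDITION & SPEC =====
def Spec_NieparzystySkrot (x : Int) (out : Int) : Prop := out = NieparzystySkrot_alt x
instance (x : Int) (out : Int) : Decidable (Spec_NieparzystySkrot x out) := by unfold Spec_NieparzystySkrot; infer_instance

-- ===== CLAIM (what is proved, stated in full; the proofs are below) =====
def Claim_equal_NieparzystySkrot : Prop := ∀ (x : Int), Dom_NieparzystySkrot x → Spec_NieparzystySkrot x (NieparzystySkrot x)

-- ===== LEMMAS AND PROOFS =====
-- B's two staged passes, as one function of the remaining high digits.
def pvAltOf (x : Nat) : Int :=
  (pvDigitList x).reverse.foldl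
    (fun out d => if d % 2 ≠ 0 then out * 10 + d else out) 0

-- Recursive characterisation of B's staged computation.
theorem altOf_rec (x : Nat) (h : x ≠ 0) :
    pvAltOf x = if ((x % 10 : Nat) : Int) % 2 ≠ 0
      then pvAltOf (x / 10) * 10 + ((x % 10 : Nat) : Int)
      else pvAltOf (x / 10) := by
  unfold pvAltOf
  rw [pvDigitList]
  simp [h, List.foldl_append]

-- Loop invariant: A's loop starting from (m, b) returns m + b * (B's value).
theorem go_eq_alt (x : Nat) : ∀ (m b : Int),
    NieparzystySkrotGo x m b = m + b * pvAltOf x := by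
  induction x using Nat.strong_induction_on with
  | _ x ih =>
    intro m b
    by_cases h : x = 0
    · simp [NieparzystySkrotGo, pvAltOf, pvDigitList, h]
    · rw [NieparzystySkrotGo, altOf_rec x h]
      simp only [h, dite_false]
      have hx' := Nat.div_lt_self (Nat.pos_of_ne_zero h) (by norm_num : 1 < 10)
      by_cases hodd : ((x % 10 : Nat) : Int) % 2 = 0
      · rw [if_neg (fun hc => hc.1 hodd), if_neg (fun hc => hc hodd), ih _ hx']
      · have hne : ((x % 10 : Nat) : Int) ≠ 0 := fun h0 => hodd (by rw [h0]; decide)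
        rw [if_pos ⟨hodd, hne⟩, if_pos hodd, ih _ hx']
        ring

-- ===== VERDICT (by name: the statement is the Claim_ definition above) =====
theorem NieparzystySkrot_spec : Claim_equal_NieparzystySkrot := by
  intro x _
  unfold Spec_NieparzystySkrot NieparzystySkrot NieparzystySkrot_alt
  rw [go_eq_alt]
  show (0 : Int) + 1 * pvAltOf x.toNat = pvAltOf x.toNat
  ring
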